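-- pv_equiv track=rewrite | github.com/AshuKPJ/contact-page-submitter-v2 | backend/app/services/csv_parser_service.py | _identify_url_column
-- ===== SOURCE A (Python) =====
-- from typing import List, Tuple, Optional, Dict, Any, Set
--
-- def _identify_url_column(headers: List[str]) -> Optional[str]:
--     """Identify the column containing URLs"""
--     if not headers:
--         return None
--
--     # Priority order for URL column names
--     url_keywords = [
--         ("url", 10),
--         ("website", 9),
--         ("web_site", 8),
--         ("site", 7),
--         ("link", 6),
--         ("domain", 5),
--         ("homepage", 4),
--         ("web", 3),
--         ("address", 2),
--         ("www", 1),
--     ]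
--
--     best_match = None
--     best_score = 0
--
--     for header in headers:
--         header_lower = header.lower().strip()
--
--         for keyword, score in url_keywords:
--             if keyword in header_lower and score > best_score:
--                 best_match = header
--                 best_score = score
--
--     # If no keyword match, check if first column looks like URLs
--     if not best_match and headers:
--         # We'll use the first column as fallback
--         best_match = headers[0]
--
--     return best_match
-- ===== SOURCE B (Python) =====
-- def _identify_url_column(headers):
--     """Identify the column containing URLs"""
--     if not headers:
--         return None
--
--     # Keywords in descending priority; the first keyword that matches any
--     # header decides, and the first matching header wins.
--     for keyword in ["url", "website", "web_site", "site", "link",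
--                     "domain", "homepage", "web", "address", "www"]:
--         for header in headers:
--             if keyword in header.lower().strip():
--                 return header
--
--     # No keyword match: fall back to the first column
--     return headers[0]
-- ===== Notes on version B (the rewrite author's own statement) =====
-- stated objective: simpler
-- what changed: Replaces A's best_match/best_score accumulator (fold over headers with an inner scored-keyword scan) by an early-return scan over the keywords in their already-descending priority order, returning the first header containing the first keyword that matches any header; no scores are kept.
import Mathlib
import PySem

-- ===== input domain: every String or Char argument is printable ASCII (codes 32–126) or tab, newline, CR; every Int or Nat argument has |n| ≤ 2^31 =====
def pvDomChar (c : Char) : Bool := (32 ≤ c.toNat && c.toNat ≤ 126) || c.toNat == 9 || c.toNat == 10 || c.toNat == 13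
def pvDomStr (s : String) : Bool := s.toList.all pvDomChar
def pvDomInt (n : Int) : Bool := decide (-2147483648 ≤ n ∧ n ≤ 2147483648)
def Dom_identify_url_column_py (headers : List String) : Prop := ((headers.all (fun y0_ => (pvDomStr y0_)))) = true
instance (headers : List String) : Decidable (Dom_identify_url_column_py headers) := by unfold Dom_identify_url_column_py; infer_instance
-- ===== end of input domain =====

-- B replaces A's best-score accumulator over headers by an early-return scan of the
-- keywords in their (already descending) priority order: same values, simpler decomposition.

-- ===== PORT A =====
def pvUrlKeywords : List (String × Int) :=
  [("url", 10), ("website", 9), ("web_site", 8), ("site", 7), ("link", 6),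
   ("domain", 5), ("homepage", 4), ("web", 3), ("address", 2), ("www", 1)]

def identify_url_column_py (headers : List String) : Option String :=
  if headers.isEmpty then none
  else
    -- for header in headers: for keyword, score in url_keywords: …
    let r := headers.foldl (fun (acc : Option String × Int) header =>
      let header_lower := PySem.Str.strip (PySem.Str.lower header)
      pvUrlKeywords.foldl (fun acc kw =>
        if PySem.Str.isIn kw.1 header_lower && decide (acc.2 < kw.2) then (some header, kw.2)
        else acc) acc) (none, 0)
    -- if not best_match and headers: best_match = headers[0]  ('not' is Python falsiness)
    if (r.1 = none ∨ r.1 = some "") ∧ headers ≠ [] then headers.head? else r.1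

-- ===== PORT B =====
def pvUrlKeywordsAlt : List String :=
  ["url", "website", "web_site", "site", "link", "domain", "homepage", "web", "address", "www"]

def identify_url_column_py_alt (headers : List String) : Option String :=
  if headers.isEmpty then none
  else
    -- for keyword in …: for header in headers: if keyword in header.lower().strip(): return header
    match pvUrlKeywordsAlt.findSome? (fun kw =>
        headers.find? (fun header => PySem.Str.isIn kw (PySem.Str.strip (PySem.Str.lower header)))) with
    | some h => some h
    | none => headers.head?

-- ===== PRECONDITION & SPEC =====
def Spec_identify_url_column_py (headers : List String) (out : Option String) : Prop := out = identify_url_column_py_alt headers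
instance (headers : List String) (out : Option String) : Decidable (Spec_identify_url_column_py headers out) := by unfold Spec_identify_url_column_py; infer_instance

-- ===== CLAIM (what is proved, stated in full; the proofs are below) =====
def Claim_equal_identify_url_column_py : Prop := ∀ (headers : List String), Dom_identify_url_column_py headers → Spec_identify_url_column_py headers (identify_url_column_py headers)

-- ===== LEMMAS AND PROOFS =====

-- header.lower().strip()
def pvHL (h : String) : String := PySem.Str.strip (PySem.Str.lower h)
-- keyword in header.lower().strip()
def pvMt (kw h : String) : Bool := PySem.Str.isIn kw (pvHL h)
-- the score A's inner loop would settle on for a single header (0 if no keyword matches)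
def pvScore (kws : List (String × Int)) (h : String) : Int :=
  ((kws.find? (fun kw => pvMt kw.1 h)).map (·.2)).getD 0
-- running maximum of pvScore over the headers seen so far
def pvM (kws : List (String × Int)) (hs : List String) : Int :=
  hs.foldl (fun a h => max a (pvScore kws h)) 0
-- B's core: first keyword matched by any header, first header matching it
def pvBc (kws : List (String × Int)) (hs : List String) : Option String :=
  kws.findSome? (fun kw => hs.find? (fun h => pvMt kw.1 h))

lemma pvScore_nil (h : String) : pvScore [] h = 0 := rfl

lemma pvScore_cons (kw : String × Int) (rest : List (String × Int)) (h : String) :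
    pvScore (kw :: rest) h = if pvMt kw.1 h then kw.2 else pvScore rest h := by
  by_cases hm : pvMt kw.1 h <;> simp [pvScore, hm]

lemma pvScore_lt (kws : List (String × Int)) (c : Int) (hlt : ∀ k ∈ kws, k.2 < c)
    (hc : 0 < c) (h : String) : pvScore kws h < c := by
  unfold pvScore
  cases hf : kws.find? (fun kw => pvMt kw.1 h) with
  | none => simpa using hc
  | some k =>
    have hk := List.mem_of_find?_eq_some hf
    have := hlt k hk
    simpa using this

lemma pvFoldlMax_init_le (f : String → Int) (hs : List String) (a : Int) :
    a ≤ hs.foldl (fun b h => max b (f h)) a := by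
  induction hs generalizing a with
  | nil => simp
  | cons h t ih => simpa using le_trans (le_max_left a (f h)) (ih (max a (f h)))

lemma pvM_nonneg (kws : List (String × Int)) (hs : List String) : 0 ≤ pvM kws hs :=
  pvFoldlMax_init_le _ hs 0

lemma pvM_append (kws : List (String × Int)) (hs : List String) (h : String) :
    pvM kws (hs ++ [h]) = max (pvM kws hs) (pvScore kws h) := by
  simp [pvM, List.foldl_append]

lemma pvFoldlMax_mem_le (f : String → Int) (hs : List String) (a : Int)
    (h : String) (hm : h ∈ hs) : f h ≤ hs.foldl (fun b h => max b (f h)) a := by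
  induction hs generalizing a with
  | nil => cases hm
  | cons x t ih =>
    rcases List.mem_cons.mp hm with rfl | hm'
    · simpa using le_trans (le_max_right a (f h)) (pvFoldlMax_init_le f t _)
    · simpa using ih _ hm'

lemma pvM_lt (kws : List (String × Int)) (hs : List String) (c : Int)
    (hc : 0 < c) (hall : ∀ h ∈ hs, pvScore kws h < c) : pvM kws hs < c := by
  unfold pvM
  induction hs using List.reverseRecOn with
  | nil => simpa using hc
  | append_singleton t x ih =>
    have h1 : List.foldl (fun a h => max a (pvScore kws h)) 0 t < c :=
      ih (fun h hm => hall h (List.mem_append_left _ hm))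
    have h2 : pvScore kws x < c := hall x (by simp)
    simp [List.foldl_append]
    omega

lemma pvM_congr (kws kws' : List (String × Int)) (hs : List String)
    (h : ∀ x ∈ hs, pvScore kws x = pvScore kws' x) : pvM kws hs = pvM kws' hs := by
  unfold pvM
  induction hs using List.reverseRecOn with
  | nil => rfl
  | append_singleton t x ih =>
    have := ih (fun y hy => h y (List.mem_append_left _ hy))
    simp [List.foldl_append, this, h x (by simp)]

-- A's inner loop over the keyword list, for one header
lemma pvInner_eq (kws : List (String × Int))
    (hDesc : kws.Pairwise (fun a b => b.2 < a.2)) (hPos : ∀ k ∈ kws, 0 < k.2)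
    (h : String) (m : Option String) (s : Int) (hs0 : 0 ≤ s) :
    kws.foldl (fun acc kw =>
        if pvMt kw.1 h && decide (acc.2 < kw.2) then (some h, kw.2) else acc) (m, s)
    = if s < pvScore kws h then (some h, pvScore kws h) else (m, s) := by
  induction kws generalizing m s with
  | nil =>
    simp [pvScore_nil]
    omega
  | cons kw rest ih =>
    have hlt : ∀ k ∈ rest, k.2 < kw.2 := fun k hk => (List.pairwise_cons.mp hDesc).1 k hk
    have hDesc' := (List.pairwise_cons.mp hDesc).2
    have hPos' : ∀ k ∈ rest, 0 < k.2 := fun k hk => hPos k (List.mem_cons_of_mem _ hk)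
    have hkpos : 0 < kw.2 := hPos kw (List.mem_cons_self)
    rw [List.foldl_cons, pvScore_cons]
    by_cases hm : pvMt kw.1 h
    · by_cases hgt : s < kw.2
      · have hrest : pvScore rest h < kw.2 := pvScore_lt rest kw.2 hlt hkpos h
        simp only [hm, hgt, decide_true, Bool.and_self, if_pos]
        rw [ih hDesc' hPos' (some h) kw.2 (le_of_lt hkpos)]
        simp [not_lt.mpr (le_of_lt hrest)]
      · have hrest : pvScore rest h < kw.2 := pvScore_lt rest kw.2 hlt hkpos h
        simp only [hm, hgt, decide_false, Bool.and_false, Bool.false_eq_true, if_false, if_true]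
        rw [ih hDesc' hPos' m s hs0]
        have : ¬ s < pvScore rest h := by omega
        simp [this]
    · simp only [hm, Bool.false_and, Bool.false_eq_true, if_false]
      rw [ih hDesc' hPos' m s hs0]

-- B's core on hs ++ [h]
lemma pvBc_append (kws : List (String × Int))
    (hDesc : kws.Pairwise (fun a b => b.2 < a.2)) (hPos : ∀ k ∈ kws, 0 < k.2)
    (hs : List String) (h : String) :
    pvBc kws (hs ++ [h]) = if pvM kws hs < pvScore kws h then some h else pvBc kws hs := by
  induction kws with
  | nil =>
    have h0 : ¬ pvM [] hs < pvScore [] h :=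
      not_lt.mpr (by rw [pvScore_nil]; exact pvM_nonneg [] hs)
    simp [pvBc, h0]
  | cons kw rest ih =>
    have hlt : ∀ k ∈ rest, k.2 < kw.2 := fun k hk => (List.pairwise_cons.mp hDesc).1 k hk
    have hDesc' := (List.pairwise_cons.mp hDesc).2
    have hPos' : ∀ k ∈ rest, 0 < k.2 := fun k hk => hPos k (List.mem_cons_of_mem _ hk)
    have hkpos : 0 < kw.2 := hPos kw (List.mem_cons_self)
    cases hf : hs.find? (fun x => pvMt kw.1 x) with
    | some h' =>
      -- some earlier header matches the head keyword: both sides return it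
      have hmem := List.mem_of_find?_eq_some hf
      have hmt : pvMt kw.1 h' = true := List.find?_some hf
      have hsc : pvScore (kw :: rest) h' = kw.2 := by rw [pvScore_cons]; simp [hmt]
      have hMge : kw.2 ≤ pvM (kw :: rest) hs := by
        have := pvFoldlMax_mem_le (pvScore (kw :: rest)) hs 0 h' hmem
        rw [hsc] at this; exact this
      have hsle : pvScore (kw :: rest) h ≤ kw.2 := by
        rw [pvScore_cons]
        by_cases hm : pvMt kw.1 h
        · simp [hm]
        · simp [hm]; exact le_of_lt (pvScore_lt rest kw.2 hlt hkpos h)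
      have hno : ¬ pvM (kw :: rest) hs < pvScore (kw :: rest) h := by omega
      simp [pvBc, List.find?_append, hf, hno]
    | none =>
      have hnone : ∀ x ∈ hs, pvMt kw.1 x = false := by
        intro x hx
        have := List.find?_eq_none.mp hf x hx
        simpa using this
      have hscongr : ∀ x ∈ hs, pvScore (kw :: rest) x = pvScore rest x := by
        intro x hx; rw [pvScore_cons]; simp [hnone x hx]
      have hMeq : pvM (kw :: rest) hs = pvM rest hs := pvM_congr _ _ hs hscongr
      by_cases hm : pvMt kw.1 h
      · -- the new header is the first to match the head keyword
        have hsc : pvScore (kw :: rest) h = kw.2 := by rw [pvScore_cons]; simp [hm]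
        have hMlt : pvM (kw :: rest) hs < kw.2 := by
          rw [hMeq]
          exact pvM_lt rest hs kw.2 hkpos
            (fun x hx => pvScore_lt rest kw.2 hlt hkpos x)
        simp [pvBc, List.find?_append, hf, hm, hsc, hMlt]
      · have hsc : pvScore (kw :: rest) h = pvScore rest h := by rw [pvScore_cons]; simp [hm]
        have hEq1 : pvBc (kw :: rest) (hs ++ [h]) = pvBc rest (hs ++ [h]) := by
          simp [pvBc, List.find?_append, hf, List.find?_cons, hm]
        have hEq2 : pvBc (kw :: rest) hs = pvBc rest hs := by
          simp [pvBc, hf]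
        rw [hEq1, hEq2, hsc, hMeq, ih hDesc' hPos']

-- A's double loop computes (B's core, the running maximum)
lemma pvFold_eq (kws : List (String × Int))
    (hDesc : kws.Pairwise (fun a b => b.2 < a.2)) (hPos : ∀ k ∈ kws, 0 < k.2)
    (hs : List String) :
    hs.foldl (fun (acc : Option String × Int) header =>
        kws.foldl (fun acc kw =>
          if PySem.Str.isIn kw.1 (PySem.Str.strip (PySem.Str.lower header)) && decide (acc.2 < kw.2)
          then (some header, kw.2) else acc) acc) (none, 0)
    = (pvBc kws hs, pvM kws hs) := by
  induction hs using List.reverseRecOn with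
  | nil =>
    have : pvBc kws [] = none := by
      unfold pvBc
      induction kws with
      | nil => rfl
      | cons kw rest ih => simp
    simp [this, pvM]
  | append_singleton t x ih =>
    rw [List.foldl_append, ih, List.foldl_cons, List.foldl_nil]
    have : (fun (acc : Option String × Int) (kw : String × Int) =>
          if PySem.Str.isIn kw.1 (PySem.Str.strip (PySem.Str.lower x)) && decide (acc.2 < kw.2)
          then (some x, kw.2) else acc)
        = (fun (acc : Option String × Int) (kw : String × Int) =>
          if pvMt kw.1 x && decide (acc.2 < kw.2) then (some x, kw.2) else acc) := rfl
    rw [this, pvInner_eq kws hDesc hPos x (pvBc kws t) (pvM kws t) (pvM_nonneg kws t),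
        pvBc_append kws hDesc hPos t x, pvM_append]
    by_cases hc : pvM kws t < pvScore kws x
    · simp [hc, max_eq_right (le_of_lt hc)]
    · simp [hc, max_eq_left (not_lt.mp hc)]

-- no header matching a keyword is the empty string
lemma pvBc_ne_empty (hs : List String) : pvBc pvUrlKeywords hs ≠ some "" := by
  intro hE
  obtain ⟨kw, hkw, hf⟩ := List.exists_of_findSome?_eq_some hE
  have hmt : pvMt kw.1 "" = true := List.find?_some hf
  have hall : pvUrlKeywords.all (fun kw => !pvMt kw.1 "") = true := by decide
  have := List.all_eq_true.mp hall kw hkw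
  simp [hmt] at this

-- B's port equals B's core (the scored and the unscored keyword lists line up)
lemma pvAlt_eq (headers : List String) :
    identify_url_column_py_alt headers
    = if headers.isEmpty then none
      else match pvBc pvUrlKeywords headers with
        | some h => some h
        | none => headers.head? := rfl

-- ===== VERDICT (by name: the statement is the Claim_ definition above) =====
theorem identify_url_column_py_spec : Claim_equal_identify_url_column_py := by
  intro headers _
  unfold Spec_identify_url_column_py
  rw [pvAlt_eq]
  unfold identify_url_column_py
  by_cases hE : headers.isEmpty
  · simp [hE]
  · have hne : headers ≠ [] := by simpa [List.isEmpty_iff] using hE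
    have hDesc : pvUrlKeywords.Pairwise (fun a b => b.2 < a.2) := by decide
    have hPos : ∀ k ∈ pvUrlKeywords, 0 < k.2 := by decide
    simp only [hE, Bool.false_eq_true, if_false]
    rw [pvFold_eq pvUrlKeywords hDesc hPos headers]
    cases hb : pvBc pvUrlKeywords headers with
    | none => simp [hne]
    | some h =>
      have hne' : some h ≠ some "" := by
        intro hc; exact pvBc_ne_empty headers (hb.trans hc)
      simp [hne']
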